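-- pv_equiv track=rewrite | github.com/Balminess/staticsliceT5 | utilities.py | remove_first_class_line
-- ===== SOURCE A (Python) =====
-- def remove_first_class_line(code: str) -> str:
--     """
--     Removes the first line that contains the word 'class' from a multi-line string.
--
--     Args:
--         code (str): Multi-line code string.
--
--     Returns:
--         str: Modified code string with the first 'class' line removed.
--     """
--     lines = code.splitlines()
--     removed = False
--     result = []
--
--     for line in lines:
--         if not removed and 'class' in line:
--             removed = True
--             continue  # skip this line
--         result.append(line)
--
--     return "\n".join(result)
-- ===== SOURCE B (Python) =====
-- def remove_first_class_line(code: str) -> str: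
--     # Flat-string algorithm: no list of lines is ever built.
--     # Normalize line endings to '\n' and drop the trailing newline
--     # (exactly what "\n".join(code.splitlines()) produces), then find the
--     # first occurrence of 'class' and splice out the enclosing line using
--     # the newline positions around it.
--     text = code.replace('\r\n', '\n').replace('\r', '\n')
--     if text.endswith('\n'):
--         text = text[:-1]
--     j = text.find('class')
--     if j == -1:
--         return text
--     start = text.rfind('\n', 0, j) + 1
--     end = text.find('\n', j)
--     if end == -1:
--         return text[:start - 1] if start > 0 else ''
--     return text[:start] + text[end + 1:]
-- ===== Notes on version B (the rewrite author's own statement) =====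
-- stated objective: alternative
-- what changed: B never builds a list of lines: it normalizes line endings on the flat string with str.replace, locates the first occurrence of the class keyword with str.find, and splices out the enclosing line using rfind/find of the surrounding newlines, where A splitlines-scans with a removed flag and rejoins.
import Mathlib
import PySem

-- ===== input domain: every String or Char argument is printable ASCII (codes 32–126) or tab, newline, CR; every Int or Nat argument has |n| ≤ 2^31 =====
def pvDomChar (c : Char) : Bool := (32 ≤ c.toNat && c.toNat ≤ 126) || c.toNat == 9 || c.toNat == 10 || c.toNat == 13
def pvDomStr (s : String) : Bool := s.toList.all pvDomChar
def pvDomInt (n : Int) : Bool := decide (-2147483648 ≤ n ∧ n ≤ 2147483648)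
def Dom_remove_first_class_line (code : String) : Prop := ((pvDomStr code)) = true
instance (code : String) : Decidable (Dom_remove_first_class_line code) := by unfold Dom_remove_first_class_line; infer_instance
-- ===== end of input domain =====

-- B re-implements the task on the flat string (normalize line endings with replace, find the first
-- occurrence of the class keyword, splice out its line via rfind/find of the surrounding newlines)
-- instead of A's splitlines scan with a removed-flag; same return value (alternative algorithm, no speed claim).


-- ===== PORT A =====
-- A's for-loop over the lines, carrying the 'removed' flag and the 'result' accumulator
def rfclLoopA : List String → Bool → List String → List String
  | [], _, result => result
  | line :: rest, removed, result =>
      if !removed && PySem.Str.isIn "class" line then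
        rfclLoopA rest true result
      else
        rfclLoopA rest removed (result ++ [line])

def remove_first_class_line (code : String) : String :=
  PySem.Str.join "\n" (rfclLoopA (PySem.Str.splitlines code) false [])

-- ===== PORT B =====
def remove_first_class_line_alt (code : String) : String :=
  let text0 := PySem.Str.replace (PySem.Str.replace code "\r\n" "\n") "\r" "\n"
  let text := if PySem.Str.endswith text0 "\n" then PySem.Str.slice text0 none (some (-1)) else text0
  let j := PySem.Str.find text "class"
  if j = -1 then text
  else
    let start := PySem.Str.rfindFrom text "\n" 0 (some j) + 1
    let e := PySem.Str.findFrom text "\n" j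
    if e = -1 then (if start > 0 then PySem.Str.slice text none (some (start - 1)) else "")
    else PySem.Str.slice text none (some start) ++ PySem.Str.slice text (some (e + 1)) none

-- ===== PRECONDITION & SPEC =====
def Spec_remove_first_class_line (code : String) (out : String) : Prop := out = remove_first_class_line_alt code
instance (code : String) (out : String) : Decidable (Spec_remove_first_class_line code out) := by unfold Spec_remove_first_class_line; infer_instance

-- ===== CLAIM (what is proved, stated in full; the proofs are below) =====
def Claim_equal_remove_first_class_line : Prop := ∀ (code : String), Dom_remove_first_class_line code → Spec_remove_first_class_line code (remove_first_class_line code)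

-- ===== LEMMAS AND PROOFS =====

-- char-level mirror of B's computation on the normalized text
def CLSL : List Char := ['c', 'l', 'a', 's', 's']

def bCut (t : List Char) (st e : Int) : List Char :=
  if e = -1 then (if st > 0 then PySem.Chars.slice t none (some (st - 1)) else [])
  else PySem.Chars.slice t none (some st) ++ PySem.Chars.slice t (some (e + 1)) none

def bSplice (t : List Char) : List Char :=
  if PySem.Chars.find t CLSL = -1 then t
  else bCut t (PySem.Chars.rfindFrom t ['\n'] 0 (some (PySem.Chars.find t CLSL)) + 1)
              (PySem.Chars.findFrom t ['\n'] (PySem.Chars.find t CLSL))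

def repCRLF : List Char → List Char
  | [] => []
  | '\r' :: '\n' :: t => '\n' :: repCRLF t
  | c :: t => c :: repCRLF t

def repCR : List Char → List Char
  | [] => []
  | c :: t => (if c = '\r' then '\n' else c) :: repCR t

def dropNL (v : List Char) : List Char :=
  if PySem.Chars.endswith v ['\n'] then v.dropLast else v

def joinT (xs : List (List Char)) : List Char := xs.flatMap (fun l => '\n' :: l)

def mJoin : List (List Char) → List Char
  | [] => []
  | x :: xs => x ++ joinT xs

def consHead (c : Char) : List (List Char) → List (List Char)
  | [] => [[c]]
  | x :: xs => (c :: x) :: xs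

def myLines : List Char → List (List Char)
  | [] => []
  | '\r' :: '\n' :: t => [] :: myLines t
  | c :: t => if c = '\n' ∨ c = '\r' then [] :: myLines t else consHead c (myLines t)

def preCons (pre : List Char) (ls : List (List Char)) : List (List Char) :=
  if pre = [] then ls else match ls with | [] => [pre] | x :: xs => (pre ++ x) :: xs

def linePos (P : List (List Char)) : Nat := (P.map (fun l => l.length + 1)).sum

-- ---------- generic list helpers ----------

theorem drop_append_cons (u : List Char) (c : Char) (v : List Char) (k : Nat) :
    List.drop (u.length + 1 + k) (u ++ c :: v) = List.drop k v := by
  have h : u ++ c :: v = (u ++ [c]) ++ v := by simp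
  have hlc : (u ++ [c]).length = u.length + 1 := by simp
  rw [h, List.drop_append, List.drop_eq_nil_of_le (by omega), List.nil_append]
  congr 1
  omega

theorem take_append_cons (u : List Char) (c : Char) (v : List Char) (k : Nat) :
    List.take (u.length + 1 + k) (u ++ c :: v) = u ++ c :: List.take k v := by
  have h : u ++ c :: v = (u ++ [c]) ++ v := by simp
  have hlc : (u ++ [c]).length = u.length + 1 := by simp
  rw [h, List.take_append, List.take_of_length_le (by omega)]
  have h2 : u.length + 1 + k - (u ++ [c]).length = k := by omega
  rw [h2]
  simp

theorem prefix_take_of_le {α : Type} (sub a b : List α) (h : sub <+: a ++ b)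
    (hl : sub.length ≤ a.length) : sub <+: a := by
  have h1 : sub = (a ++ b).take sub.length := by
    rcases h with ⟨t, ht⟩
    rw [← ht, List.take_append_of_le_length (le_refl _), List.take_length]
  rw [List.take_append_of_le_length hl] at h1
  rw [h1]
  exact List.take_prefix _ _

theorem mem_of_prefix_append_gt {α : Type} (sub a : List α) (c : α) (b : List α)
    (h : sub <+: a ++ c :: b) (hl : a.length < sub.length) : c ∈ sub := by
  have h1 : sub[a.length]'hl = (a ++ c :: b)[a.length]'(by simp) := h.getElem hl
  have h2 : (a ++ c :: b)[a.length]'(by simp) = c := by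
    rw [List.getElem_append_right (le_refl _)]
    simp
  exact (h1.trans h2) ▸ List.getElem_mem hl

theorem prefix_drop_split (sub u v : List Char) (j : Nat) (hnl : '\n' ∉ sub)
    (h : sub <+: (u ++ '\n' :: v).drop j) :
    (j ≤ u.length ∧ sub <+: u.drop j) ∨ (u.length < j ∧ sub <+: v.drop (j - u.length - 1)) := by
  by_cases hj : j ≤ u.length
  · left
    refine ⟨hj, ?_⟩
    rw [List.drop_append, Nat.sub_eq_zero_of_le hj, List.drop_zero] at h
    by_cases hls : sub.length ≤ (u.drop j).length
    · exact prefix_take_of_le _ _ _ h hls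
    · exact absurd (mem_of_prefix_append_gt _ _ _ _ h (by omega)) hnl
  · right
    refine ⟨by omega, ?_⟩
    have e1 : List.drop j (u ++ '\n' :: v) = List.drop (j - u.length - 1) v := by
      have hj' : j = u.length + 1 + (j - u.length - 1) := by omega
      rw [hj', drop_append_cons]
      congr 1
      omega
    rwa [e1] at h

theorem prefix_drop_extend (sub u x : List Char) (j : Nat) (hj : j ≤ u.length)
    (h : sub <+: u.drop j) : sub <+: (u ++ x).drop j := by
  rw [List.drop_append, Nat.sub_eq_zero_of_le hj, List.drop_zero]
  exact h.trans (List.prefix_append _ _)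

theorem infix_of_prefix_drop (sub s : List Char) (j : Nat) (h : sub <+: s.drop j) :
    sub <:+: s :=
  List.infix_iff_prefix_suffix.mpr ⟨s.drop j, h, List.drop_suffix _ _⟩

theorem infix_iff_exists_prefix_drop (sub s : List Char) :
    sub <:+: s ↔ ∃ j, sub <+: s.drop j := by
  constructor
  · intro h
    have h1 := (PySem.Chars.isIn_iff_infix sub s).mpr h
    exact (PySem.Chars.exists_prefix_drop_iff_isIn sub s).mpr h1
  · rintro ⟨j, hj⟩
    exact infix_of_prefix_drop _ _ _ hj

-- ---------- find/rfind characterizations ----------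

theorem find_eq_nat (t sub : List Char) (k : Nat) (h1 : sub <+: t.drop k)
    (h2 : ∀ i < k, ¬ sub <+: t.drop i) : PySem.Chars.find t sub = k := by
  have hinf : sub <:+: t := infix_of_prefix_drop _ _ _ h1
  have hnn : 0 ≤ PySem.Chars.find t sub := (PySem.Chars.find_nonneg_iff t sub).mpr hinf
  obtain ⟨hp, hmin⟩ := PySem.Chars.find_spec hnn
  rcases Nat.lt_trichotomy (PySem.Chars.find t sub).toNat k with hlt | heq | hgt
  · exact absurd hp (h2 _ hlt)
  · omega
  · exact absurd h1 (hmin k hgt)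

theorem find_eq_neg (t sub : List Char) (h : ∀ j, ¬ sub <+: t.drop j) :
    PySem.Chars.find t sub = -1 := by
  rw [PySem.Chars.find_eq_neg_one_iff]
  intro hinf
  obtain ⟨j, hj⟩ := (infix_iff_exists_prefix_drop sub t).mp hinf
  exact h j hj

theorem single_prefix_drop (s : List Char) (c : Char) (j : Nat) :
    [c] <+: s.drop j ↔ ∃ h : j < s.length, s[j] = c := by
  constructor
  · intro h
    have hne : s.drop j ≠ [] := by
      intro hnil
      rw [hnil] at h
      exact absurd (List.eq_nil_of_prefix_nil h) (by simp)
    have hj : j < s.length := by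
      by_contra hc
      exact hne (List.drop_eq_nil_of_le (by omega))
    refine ⟨hj, ?_⟩
    rw [List.drop_eq_getElem_cons hj, List.cons_prefix_cons] at h
    exact h.1.symm
  · rintro ⟨hj, hc⟩
    rw [List.drop_eq_getElem_cons hj, hc, List.cons_prefix_cons]
    exact ⟨rfl, List.nil_prefix⟩

theorem mem_of_single_prefix_drop (s : List Char) (c : Char) (j : Nat)
    (h : [c] <+: s.drop j) : c ∈ s := by
  obtain ⟨hj, hc⟩ := (single_prefix_drop s c j).mp h
  exact hc ▸ List.getElem_mem hj

theorem rfind_go_neg (s sub : List Char) (k : Nat)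
    (h : ∀ j ≤ k, ¬ sub <+: s.drop j) : PySem.Chars.rfind.go s sub k = -1 := by
  induction k with
  | zero =>
    rw [PySem.Chars.rfind.go, if_neg]
    intro hp
    exact h 0 (le_refl _) (by simpa [List.isPrefixOf_iff_prefix] using hp)
  | succ k ih =>
    rw [PySem.Chars.rfind.go, if_neg]
    · exact ih (fun j hj => h j (by omega))
    · intro hp
      exact h (k+1) (le_refl _) (by simpa [List.isPrefixOf_iff_prefix] using hp)

theorem rfind_go_eq (s sub : List Char) (k m : Nat) (hm : m ≤ k)
    (h1 : sub <+: s.drop m) (h2 : ∀ j, m < j → j ≤ k → ¬ sub <+: s.drop j) :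
    PySem.Chars.rfind.go s sub k = m := by
  induction k with
  | zero =>
    have h0 : m = 0 := by omega
    subst h0
    rw [PySem.Chars.rfind.go,
        if_pos (by simpa [List.isPrefixOf_iff_prefix] using h1)]
    simp
  | succ k ih =>
    by_cases hmk : m = k + 1
    · subst hmk
      rw [PySem.Chars.rfind.go,
          if_pos (by simpa [List.isPrefixOf_iff_prefix] using h1)]
    · rw [PySem.Chars.rfind.go, if_neg]
      · exact ih (by omega) (fun j hj hjk => h2 j hj (by omega))
      · intro hp
        exact h2 (k+1) (by omega) (le_refl _) (by simpa [List.isPrefixOf_iff_prefix] using hp)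

theorem rfind_eq_nat (s sub : List Char) (m : Nat) (hm : m ≤ s.length)
    (h1 : sub <+: s.drop m) (h2 : ∀ j, m < j → j ≤ s.length → ¬ sub <+: s.drop j) :
    PySem.Chars.rfind s sub = m := by
  unfold PySem.Chars.rfind
  exact rfind_go_eq s sub s.length m hm h1 h2

theorem rfind_eq_neg (s sub : List Char) (h : ∀ j ≤ s.length, ¬ sub <+: s.drop j) :
    PySem.Chars.rfind s sub = -1 := by
  unfold PySem.Chars.rfind
  exact rfind_go_neg s sub s.length h

theorem rfind_go_cases (s sub : List Char) (k : Nat) :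
    PySem.Chars.rfind.go s sub k = -1 ∨
    ∃ m, m ≤ k ∧ PySem.Chars.rfind.go s sub k = m ∧ sub <+: s.drop m ∧
      ∀ j, m < j → j ≤ k → ¬ sub <+: s.drop j := by
  induction k with
  | zero =>
    by_cases hp : sub <+: s.drop 0
    · right
      exact ⟨0, le_refl _,
        by rw [PySem.Chars.rfind.go, if_pos (by simpa [List.isPrefixOf_iff_prefix] using hp)]; simp,
        hp, fun j hj hjk => by omega⟩
    · left
      rw [PySem.Chars.rfind.go, if_neg (by simpa [List.isPrefixOf_iff_prefix] using hp)]
  | succ k ih =>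
    by_cases hp : sub <+: s.drop (k+1)
    · right
      exact ⟨k+1, le_refl _,
        by rw [PySem.Chars.rfind.go, if_pos (by simpa [List.isPrefixOf_iff_prefix] using hp)],
        hp, fun j hj hjk => by omega⟩
    · rw [PySem.Chars.rfind.go, if_neg (by simpa [List.isPrefixOf_iff_prefix] using hp)]
      rcases ih with h | ⟨m, hm, heq, hpre, hmax⟩
      · exact Or.inl h
      · right
        refine ⟨m, by omega, heq, hpre, fun j hj hjk => ?_⟩
        rcases Nat.lt_or_ge j (k+1) with hlt | hge
        · exact hmax j hj (by omega)
        · have : j = k + 1 := by omega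
          exact this ▸ hp

theorem rfind_cases (s sub : List Char) :
    PySem.Chars.rfind s sub = -1 ∨
    ∃ m, m ≤ s.length ∧ PySem.Chars.rfind s sub = m ∧ sub <+: s.drop m ∧
      ∀ j, m < j → j ≤ s.length → ¬ sub <+: s.drop j := by
  unfold PySem.Chars.rfind
  exact rfind_go_cases s sub s.length

theorem rfind_nl_not_mem (s : List Char) (h : '\n' ∉ s) :
    PySem.Chars.rfind s ['\n'] = -1 := by
  apply rfind_eq_neg
  intro j _ hp
  exact h (mem_of_single_prefix_drop s '\n' j hp)

theorem rfind_nl_last (u v : List Char) (hv : '\n' ∉ v) :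
    PySem.Chars.rfind (u ++ '\n' :: v) ['\n'] = u.length := by
  apply rfind_eq_nat
  · simp
  · rw [List.drop_append, Nat.sub_self, List.drop_length, List.nil_append, List.drop_zero]
    exact ⟨v, rfl⟩
  · intro j hj hjl hp
    have e1 : List.drop j (u ++ '\n' :: v) = List.drop (j - u.length - 1) v := by
      have hj' : j = u.length + 1 + (j - u.length - 1) := by omega
      rw [hj', drop_append_cons]
      congr 1
      omega
    rw [e1] at hp
    exact hv (mem_of_single_prefix_drop v '\n' _ hp)

theorem rfind_nl_shift (u v : List Char) (h : 0 ≤ PySem.Chars.rfind v ['\n']) :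
    PySem.Chars.rfind (u ++ '\n' :: v) ['\n'] = u.length + 1 + PySem.Chars.rfind v ['\n'] := by
  rcases rfind_cases v ['\n'] with hneg | ⟨m, hm, heq, hpre, hmax⟩
  · rw [hneg] at h
    omega
  · have hres : PySem.Chars.rfind (u ++ '\n' :: v) ['\n'] = ((u.length + 1 + m : Nat) : Int) := by
      apply rfind_eq_nat
      · simp
        omega
      · rw [drop_append_cons]
        exact hpre
      · intro j hj hjl hp
        have e1 : List.drop j (u ++ '\n' :: v) = List.drop (j - u.length - 1) v := by
          have hj' : j = u.length + 1 + (j - u.length - 1) := by omega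
          rw [hj', drop_append_cons]
          congr 1
          omega
        rw [e1] at hp
        refine hmax (j - u.length - 1) (by omega) (by simp at hjl; omega) hp
    rw [hres, heq]
    push_cast
    ring

theorem find_nl_first (u v : List Char) (hu : '\n' ∉ u) :
    PySem.Chars.find (u ++ '\n' :: v) ['\n'] = u.length := by
  apply find_eq_nat
  · rw [List.drop_append, Nat.sub_self, List.drop_length, List.nil_append, List.drop_zero]
    exact ⟨v, rfl⟩
  · intro i hi hp
    rw [List.drop_append, Nat.sub_eq_zero_of_le (by omega), List.drop_zero] at hp
    by_cases hls : ([('\n' : Char)]).length ≤ (u.drop i).length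
    · exact hu (mem_of_single_prefix_drop u '\n' i (prefix_take_of_le _ _ _ hp hls))
    · simp at hls
      have hi2 : i < u.length := hi
      omega

theorem find_nl_none (s : List Char) (h : '\n' ∉ s) :
    PySem.Chars.find s ['\n'] = -1 := by
  apply find_eq_neg
  intro j hp
  exact h (mem_of_single_prefix_drop s '\n' j hp)

-- ---------- facts about CLSL occurrences ----------

theorem clsl_nl_not_mem : '\n' ∉ CLSL := by decide

theorem find_clsl_bound (m : List Char) (hm : CLSL <:+: m) :
    (PySem.Chars.find m CLSL).toNat + 5 ≤ m.length ∧ 0 ≤ PySem.Chars.find m CLSL := by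
  have hnn : 0 ≤ PySem.Chars.find m CLSL := (PySem.Chars.find_nonneg_iff m CLSL).mpr hm
  obtain ⟨hp, _⟩ := PySem.Chars.find_spec hnn
  have h1 := hp.length_le
  rw [List.length_drop] at h1
  have h2 : CLSL.length = 5 := by decide
  rw [h2] at h1
  exact ⟨by omega, hnn⟩

theorem find_append_of_infix (m r : List Char) (hm : CLSL <:+: m) :
    PySem.Chars.find (m ++ r) CLSL = PySem.Chars.find m CLSL := by
  obtain ⟨hb, hnn⟩ := find_clsl_bound m hm
  obtain ⟨hp, hmin⟩ := PySem.Chars.find_spec hnn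
  set j0 := (PySem.Chars.find m CLSL).toNat with hj0
  have hres : PySem.Chars.find (m ++ r) CLSL = (j0 : Int) := by
    apply find_eq_nat
    · exact prefix_drop_extend _ _ _ _ (by omega) hp
    · intro i hi hpre
      have hle : CLSL.length ≤ (m.drop i).length := by
        rw [List.length_drop]
        have h5 : CLSL.length = 5 := by decide
        omega
      rw [List.drop_append, Nat.sub_eq_zero_of_le (by omega), List.drop_zero] at hpre
      exact hmin i hi (prefix_take_of_le _ _ _ hpre hle)
  rw [hres, hj0, Int.toNat_of_nonneg hnn]

theorem find_append_no (a w : List Char) (ha : ¬ CLSL <:+: a) :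
    PySem.Chars.find (a ++ '\n' :: w) CLSL =
      if PySem.Chars.find w CLSL = -1 then -1 else a.length + 1 + PySem.Chars.find w CLSL := by
  by_cases hw : PySem.Chars.find w CLSL = -1
  · rw [if_pos hw]
    apply find_eq_neg
    intro j hp
    rcases prefix_drop_split CLSL a w j clsl_nl_not_mem hp with ⟨_, hpa⟩ | ⟨_, hpw⟩
    · exact ha (infix_of_prefix_drop _ _ _ hpa)
    · exact (PySem.Chars.find_eq_neg_one_iff w CLSL).mp hw (infix_of_prefix_drop _ _ _ hpw)
  · rw [if_neg hw]
    have hnn : 0 ≤ PySem.Chars.find w CLSL := by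
      rcases (PySem.Chars.neg_one_le_find w CLSL).lt_or_eq with h | h
      · omega
      · exact absurd h.symm hw
    obtain ⟨hp, hmin⟩ := PySem.Chars.find_spec hnn
    set k' := (PySem.Chars.find w CLSL).toNat with hk'
    have hres : PySem.Chars.find (a ++ '\n' :: w) CLSL = ((a.length + 1 + k' : Nat) : Int) := by
      apply find_eq_nat
      · rw [drop_append_cons]
        exact hp
      · intro i hi hpre
        rcases prefix_drop_split CLSL a w i clsl_nl_not_mem hpre with ⟨_, hpa⟩ | ⟨hgt, hpw⟩
        · exact ha (infix_of_prefix_drop _ _ _ hpa)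
        · exact hmin (i - a.length - 1) (by omega) hpw
    rw [hres]
    push_cast
    omega

-- ---------- rfindFrom unfolding ----------

theorem rfindFrom_zero_some (s sub : List Char) (e : Int) (h0 : 0 ≤ e) (hle : e ≤ s.length) :
    PySem.Chars.rfindFrom s sub 0 (some e) = PySem.Chars.rfind (s.take e.toNat) sub := by
  have h1 : ¬ ((s.length : Int) < e) := by omega
  have h2 : ¬ (e < 0) := by omega
  simp only [PySem.Chars.rfindFrom, if_neg h1, if_neg h2]
  norm_num
  rcases eq_or_ne (PySem.Chars.rfind (List.take e.toNat s) sub) (-1) with hr | hr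
  · simp [hr]
  · simp [hr]
    intro hlt
    exact absurd hlt h2

-- ---------- mJoin structure ----------

theorem joinT_cons (x : List Char) (xs : List (List Char)) :
    joinT (x :: xs) = '\n' :: mJoin (x :: xs) := by
  simp [joinT, mJoin]

theorem mJoin_cons₂ (a : List Char) (ls : List (List Char)) (h : ls ≠ []) :
    mJoin (a :: ls) = a ++ '\n' :: mJoin ls := by
  cases ls with
  | nil => exact absurd rfl h
  | cons x xs => rw [mJoin, joinT_cons]

theorem mJoin_append (P Q : List (List Char)) (hP : P ≠ []) (hQ : Q ≠ []) :
    mJoin (P ++ Q) = mJoin P ++ '\n' :: mJoin Q := by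
  induction P with
  | nil => exact absurd rfl hP
  | cons a P ih =>
    cases P with
    | nil =>
      cases Q with
      | nil => exact absurd rfl hQ
      | cons q Q' => simp [mJoin, joinT]
    | cons b P' =>
      rw [List.cons_append, mJoin_cons₂ a (b :: P' ++ Q) (by simp), ih (by simp),
          mJoin_cons₂ a (b :: P') (by simp)]
      simp

theorem linePos_cons (a : List Char) (P : List (List Char)) :
    linePos (a :: P) = a.length + 1 + linePos P := by
  simp [linePos]

theorem linePos_pos (P : List (List Char)) (h : P ≠ []) : 1 ≤ linePos P := by
  cases P with
  | nil => exact absurd rfl h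
  | cons a P => rw [linePos_cons]; omega

theorem mJoin_split_length (P : List (List Char)) (m : List Char) (Q : List (List Char)) :
    (mJoin (P ++ m :: Q)).length = linePos P + m.length + (joinT Q).length := by
  induction P with
  | nil => simp [mJoin, linePos]
  | cons a P ih =>
    rw [List.cons_append, mJoin_cons₂ a _ (by simp), linePos_cons]
    simp at ih ⊢
    omega

theorem drop_linePos (P ls : List (List Char)) (x : Nat) (h : ls ≠ []) :
    (mJoin (P ++ ls)).drop (linePos P + x) = (mJoin ls).drop x := by
  induction P with
  | nil => simp [linePos]
  | cons a P ih =>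
    rw [List.cons_append, mJoin_cons₂ a (P ++ ls) (by simp [h]), linePos_cons]
    have harr : a.length + 1 + linePos P + x = a.length + 1 + (linePos P + x) := by omega
    rw [harr, drop_append_cons, ih]

theorem take_linePos_sub_one (P ls : List (List Char)) (h : P ≠ []) :
    (mJoin (P ++ ls)).take (linePos P - 1) = mJoin P := by
  induction P with
  | nil => exact absurd rfl h
  | cons a P' ih =>
    by_cases hP' : P' = []
    · subst hP'
      have h1 : linePos [a] - 1 = a.length := by rw [linePos_cons]; simp [linePos]
      rw [h1, List.cons_append, List.nil_append]
      show (a ++ joinT ls).take a.length = mJoin [a]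
      rw [List.take_append_of_le_length (le_refl _), List.take_length]
      simp [mJoin, joinT]
    · rw [List.cons_append, mJoin_cons₂ a (P' ++ ls) (by simp [hP']), linePos_cons]
      have harr : a.length + 1 + linePos P' - 1 = a.length + 1 + (linePos P' - 1) := by
        have := linePos_pos P' hP'
        omega
      rw [harr, take_append_cons, ih hP', mJoin_cons₂ a P' hP']

theorem take_linePos (P ls : List (List Char)) (h : ls ≠ []) :
    (mJoin (P ++ ls)).take (linePos P) = if P = [] then [] else mJoin P ++ ['\n'] := by
  induction P with
  | nil => simp [linePos]
  | cons a P' ih =>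
    rw [if_neg (by simp), List.cons_append, mJoin_cons₂ a (P' ++ ls) (by simp [h]),
        linePos_cons, take_append_cons, ih]
    by_cases hP' : P' = []
    · subst hP'
      simp [mJoin, joinT]
    · rw [if_neg hP', mJoin_cons₂ a P' hP']
      simp

-- ---------- the quantity lemmas ----------

theorem find_full (P : List (List Char)) (m : List Char) (Q : List (List Char))
    (hPf : ∀ l ∈ P, ¬ CLSL <:+: l) (hm : CLSL <:+: m) :
    PySem.Chars.find (mJoin (P ++ m :: Q)) CLSL = linePos P + PySem.Chars.find m CLSL := by
  have hnn : 0 ≤ PySem.Chars.find m CLSL := (PySem.Chars.find_nonneg_iff m CLSL).mpr hm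
  induction P with
  | nil =>
    rw [List.nil_append]
    show PySem.Chars.find (m ++ joinT Q) CLSL = _
    rw [find_append_of_infix m _ hm]
    simp [linePos]
  | cons a P ih =>
    rw [List.cons_append, mJoin_cons₂ a (P ++ m :: Q) (by simp),
        find_append_no a _ (hPf a (by simp)),
        ih (fun l hl => hPf l (by simp [hl])),
        if_neg (by omega), linePos_cons]
    push_cast
    ring

theorem rfind_start (P : List (List Char)) (m : List Char) (Q : List (List Char))
    (hm : CLSL <:+: m) (hnl : '\n' ∉ m) :
    PySem.Chars.rfind ((mJoin (P ++ m :: Q)).take (linePos P + (PySem.Chars.find m CLSL).toNat)) ['\n']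
      = (linePos P : Int) - 1 := by
  obtain ⟨hb, hnn⟩ := find_clsl_bound m hm
  set j0 := (PySem.Chars.find m CLSL).toNat with hj0
  induction P with
  | nil =>
    rw [List.nil_append]
    show PySem.Chars.rfind ((m ++ joinT Q).take (linePos [] + j0)) ['\n'] = _
    have h1 : linePos [] + j0 = j0 := by simp [linePos]
    rw [h1, List.take_append_of_le_length (by omega)]
    rw [rfind_nl_not_mem _ (fun hmem => hnl (List.mem_of_mem_take hmem))]
    have h0 : linePos ([] : List (List Char)) = 0 := by simp [linePos]
    rw [h0]
    norm_num
  | cons a P ih =>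
    rw [List.cons_append, mJoin_cons₂ a (P ++ m :: Q) (by simp), linePos_cons]
    have harr : a.length + 1 + linePos P + j0 = a.length + 1 + (linePos P + j0) := by omega
    rw [harr, take_append_cons]
    by_cases hP : P = []
    · subst hP
      have h1 : linePos ([] : List (List Char)) + j0 = j0 := by simp [linePos]
      rw [h1] at ih ⊢
      rw [List.nil_append]
      show PySem.Chars.rfind (a ++ '\n' :: (m ++ joinT Q).take j0) ['\n'] = _
      rw [List.take_append_of_le_length (by omega),
          rfind_nl_last a _ (fun hmem => hnl (List.mem_of_mem_take hmem))]
      have h0 : linePos ([] : List (List Char)) = 0 := by simp [linePos]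
      rw [h0]
      push_cast
      ring
    · rw [rfind_nl_shift a _ (by rw [ih]; have := linePos_pos P hP; omega), ih]
      have := linePos_pos P hP
      push_cast
      omega

theorem find_end (P : List (List Char)) (m : List Char) (Q : List (List Char))
    (hm : CLSL <:+: m) (hnl : '\n' ∉ m) :
    PySem.Chars.findFrom (mJoin (P ++ m :: Q)) ['\n']
        ((linePos P + (PySem.Chars.find m CLSL).toNat : Nat) : Int)
      = if Q = [] then -1 else ((linePos P + m.length : Nat) : Int) := by
  obtain ⟨hb, hnn⟩ := find_clsl_bound m hm
  set j0 := (PySem.Chars.find m CLSL).toNat with hj0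
  have hlen := mJoin_split_length P m Q
  rw [PySem.Chars.findFrom_natCast _ _ _ (by omega)]
  have hdrop : (mJoin (P ++ m :: Q)).drop (linePos P + j0) = m.drop j0 ++ joinT Q := by
    rw [drop_linePos P (m :: Q) j0 (by simp)]
    show (m ++ joinT Q).drop j0 = _
    rw [List.drop_append, Nat.sub_eq_zero_of_le (by omega), List.drop_zero]
  rw [hdrop]
  cases Q with
  | nil =>
    rw [if_pos rfl]
    have hjt : joinT ([] : List (List Char)) = [] := by simp [joinT]
    rw [hjt, List.append_nil,
        find_nl_none _ (fun hmem => hnl (List.mem_of_mem_drop hmem))]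
    simp
  | cons q Q' =>
    rw [if_neg (show ¬ (q :: Q' = ([] : List (List Char))) by simp), joinT_cons,
        find_nl_first _ _ (fun hmem => hnl (List.mem_of_mem_drop hmem))]
    rw [if_neg (show ¬ (((List.drop j0 m).length : Int) = -1) by omega)]
    rw [List.length_drop]
    push_cast
    omega

-- ---------- bSplice evaluation ----------

theorem mJoin_no_infix (L : List (List Char)) (h : ∀ l ∈ L, ¬ CLSL <:+: l) :
    ¬ CLSL <:+: mJoin L := by
  induction L with
  | nil =>
    intro hinf
    rw [show mJoin [] = [] from rfl, List.infix_nil] at hinf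
    exact absurd hinf (by decide)
  | cons x xs ih =>
    cases xs with
    | nil =>
      intro hinf
      exact h x (by simp) (by simpa [mJoin, joinT] using hinf)
    | cons y ys =>
      rw [mJoin_cons₂ x (y :: ys) (by simp)]
      intro hinf
      obtain ⟨j, hj⟩ := (infix_iff_exists_prefix_drop _ _).mp hinf
      rcases prefix_drop_split CLSL x (mJoin (y :: ys)) j clsl_nl_not_mem hj with ⟨_, hpa⟩ | ⟨_, hpw⟩
      · exact h x (by simp) (infix_of_prefix_drop _ _ _ hpa)
      · exact ih (fun l hl => h l (by simp [hl])) (infix_of_prefix_drop _ _ _ hpw)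

theorem bSplice_nomatch (L : List (List Char)) (h : ∀ l ∈ L, ¬ CLSL <:+: l) :
    bSplice (mJoin L) = mJoin L := by
  unfold bSplice
  rw [if_pos ((PySem.Chars.find_eq_neg_one_iff _ _).mpr (mJoin_no_infix L h))]

theorem bSplice_match (P : List (List Char)) (m : List Char) (Q : List (List Char))
    (hPf : ∀ l ∈ P, ¬ CLSL <:+: l) (hm : CLSL <:+: m) (hnl : '\n' ∉ m) :
    bSplice (mJoin (P ++ m :: Q)) = mJoin (P ++ Q) := by
  obtain ⟨hb, hnn⟩ := find_clsl_bound m hm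
  set t := mJoin (P ++ m :: Q) with ht
  have hlen := mJoin_split_length P m Q
  have hfm : PySem.Chars.find m CLSL = ((PySem.Chars.find m CLSL).toNat : Int) :=
    (Int.toNat_of_nonneg hnn).symm
  set j0 := (PySem.Chars.find m CLSL).toNat with hj0
  have hjval : PySem.Chars.find t CLSL = ((linePos P + j0 : Nat) : Int) := by
    rw [ht, find_full P m Q hPf hm, hfm]
    push_cast
    ring
  have hlt : ((linePos P + j0 : Nat) : Int) ≤ (t.length : Int) := by
    rw [ht]
    push_cast [hlen]
    omega
  have hstart : PySem.Chars.rfindFrom t ['\n'] 0 (some (PySem.Chars.find t CLSL)) + 1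
      = ((linePos P : Nat) : Int) := by
    rw [hjval, rfindFrom_zero_some _ _ _ (by omega) hlt]
    have htn : ((linePos P + j0 : Nat) : Int).toNat = linePos P + j0 := by omega
    rw [htn, ht, rfind_start P m Q hm hnl]
    ring
  have hend : PySem.Chars.findFrom t ['\n'] (PySem.Chars.find t CLSL)
      = if Q = [] then -1 else ((linePos P + m.length : Nat) : Int) := by
    rw [hjval, ht]
    exact find_end P m Q hm hnl
  unfold bSplice bCut
  rw [if_neg (by rw [hjval]; omega), hstart]
  cases Q with
  | nil =>
    rw [if_pos rfl] at hend
    rw [hend, if_pos rfl]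
    by_cases hP : P = []
    · subst hP
      rw [if_neg (by simp [linePos])]
      simp [mJoin]
    · have hlp := linePos_pos P hP
      rw [if_pos (by omega)]
      rw [PySem.Chars.slice_eq_listSlice]
      rw [show PySem.List.slice t none (some (((linePos P : Nat) : Int) - 1))
            = t.take (((linePos P : Nat) : Int) - 1).toNat from PySem.List.slice_to t (by omega)]
      have htn : (((linePos P : Nat) : Int) - 1).toNat = linePos P - 1 := by omega
      rw [htn, ht]
      show (mJoin (P ++ m :: [])).take (linePos P - 1) = _
      rw [take_linePos_sub_one P (m :: []) hP, List.append_nil]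
  | cons q Q' =>
    rw [if_neg (show ¬ (q :: Q' = ([] : List (List Char))) by simp)] at hend
    rw [hend, if_neg (show ¬ (((linePos P + m.length : Nat) : Int) = -1) by omega)]
    rw [PySem.Chars.slice_eq_listSlice, PySem.Chars.slice_eq_listSlice]
    rw [show PySem.List.slice t none (some ((linePos P : Nat) : Int))
          = t.take ((linePos P : Nat) : Int).toNat from PySem.List.slice_to t (by omega)]
    rw [show PySem.List.slice t (some (((linePos P + m.length : Nat) : Int) + 1)) none
          = t.drop (((linePos P + m.length : Nat) : Int) + 1).toNat from PySem.List.slice_from t (by omega)]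
    have ht1 : (((linePos P : Nat) : Int)).toNat = linePos P := by omega
    have ht2 : ((((linePos P + m.length : Nat) : Int) + 1)).toNat = linePos P + (m.length + 1) := by omega
    rw [ht1, ht2, ht]
    have hdrop : (mJoin (P ++ m :: q :: Q')).drop (linePos P + (m.length + 1)) = mJoin (q :: Q') := by
      rw [drop_linePos P (m :: q :: Q') _ (by simp)]
      show (m ++ joinT (q :: Q')).drop (m.length + 1) = _
      rw [joinT_cons]
      have h0 : m.length + 1 = m.length + 1 + 0 := by omega
      rw [h0, drop_append_cons, List.drop_zero]
    rw [hdrop, take_linePos P (m :: q :: Q') (by simp)]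
    by_cases hP : P = []
    · subst hP
      simp
    · rw [if_neg hP, mJoin_append P (q :: Q') hP (by simp)]
      simp

-- ---------- normalization: replace / splitlines / join ----------

theorem char_eq_iff_toNat (c d : Char) : c = d ↔ c.toNat = d.toNat :=
  ⟨fun h => by rw [h], fun h => Char.ext (UInt32.toNat_inj.mp h)⟩

theorem repCRLF_crlf (t : List Char) : repCRLF ('\r' :: '\n' :: t) = '\n' :: repCRLF t := rfl

theorem repCRLF_cons_ne (c : Char) (t : List Char) (hc : c ≠ '\r') :
    repCRLF (c :: t) = c :: repCRLF t := by
  rw [repCRLF.eq_def]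
  split <;> simp_all

theorem repCRLF_cr_nil : repCRLF ['\r'] = ['\r'] := rfl

theorem repCRLF_cr_cons (d : Char) (t : List Char) (hd : d ≠ '\n') :
    repCRLF ('\r' :: d :: t) = '\r' :: repCRLF (d :: t) := by
  rw [repCRLF.eq_def]
  split
  all_goals try simp_all
  all_goals
    rename_i hx heq
    obtain ⟨h1, h2⟩ := heq
    subst h1
    subst h2
    simp

theorem repCR_cons (c : Char) (t : List Char) :
    repCR (c :: t) = (if c = '\r' then '\n' else c) :: repCR t := rfl

theorem myLines_crlf (t : List Char) : myLines ('\r' :: '\n' :: t) = [] :: myLines t := rfl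

theorem myLines_cons_ne (c : Char) (t : List Char) (hc : c ≠ '\r') :
    myLines (c :: t) = if c = '\n' ∨ c = '\r' then [] :: myLines t else consHead c (myLines t) := by
  rw [myLines.eq_def]
  split <;> simp_all

theorem myLines_cr_nil : myLines ['\r'] = [[]] := rfl

theorem myLines_cr_cons (d : Char) (t : List Char) (hd : d ≠ '\n') :
    myLines ('\r' :: d :: t) = [] :: myLines (d :: t) := by
  rw [myLines.eq_def]
  split
  all_goals try simp_all
  all_goals
    rename_i hx heq
    obtain ⟨h1, h2⟩ := heq
    subst h1
    subst h2
    simp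

theorem consHead_ne_nil (c : Char) (M : List (List Char)) : consHead c M ≠ [] := by
  cases M <;> simp [consHead]

theorem repCRLF_ne_nil (s : List Char) (h : s ≠ []) : repCRLF s ≠ [] := by
  cases s with
  | nil => exact absurd rfl h
  | cons c t =>
    by_cases hc : c = '\r'
    · subst hc
      cases t with
      | nil => rw [repCRLF_cr_nil]; simp
      | cons d t' =>
        by_cases hd : d = '\n'
        · subst hd; rw [repCRLF_crlf]; simp
        · rw [repCRLF_cr_cons d t' hd]; simp
    · rw [repCRLF_cons_ne c t hc]; simp

theorem repCR_ne_nil (s : List Char) (h : s ≠ []) : repCR s ≠ [] := by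
  cases s with
  | nil => exact absurd rfl h
  | cons c t => rw [repCR_cons]; simp

theorem myLines_ne_nil (s : List Char) (h : s ≠ []) : myLines s ≠ [] := by
  cases s with
  | nil => exact absurd rfl h
  | cons c t =>
    by_cases hc : c = '\r'
    · subst hc
      cases t with
      | nil => rw [myLines_cr_nil]; simp
      | cons d t' =>
        by_cases hd : d = '\n'
        · subst hd; rw [myLines_crlf]; simp
        · rw [myLines_cr_cons d t' hd]; simp
    · rw [myLines_cons_ne c t hc]
      by_cases hb : c = '\n' ∨ c = '\r'
      · rw [if_pos hb]; simp
      · rw [if_neg hb]; exact consHead_ne_nil _ _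

theorem mJoin_consHead (c : Char) (M : List (List Char)) :
    mJoin (consHead c M) = c :: mJoin M := by
  cases M <;> simp [consHead, mJoin, joinT]

theorem endswith_nl_cons (c : Char) (v : List Char) (hv : v ≠ []) :
    PySem.Chars.endswith (c :: v) ['\n'] = PySem.Chars.endswith v ['\n'] := by
  have hne : ¬ ((['\n'] : List Char) = c :: v) := by
    intro h
    injection h with _ h2
    exact hv h2.symm
  simp only [PySem.Chars.endswith]
  rw [Bool.eq_iff_iff, List.isSuffixOf_iff_suffix, List.isSuffixOf_iff_suffix,
      List.suffix_cons_iff]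
  simp [hne]

theorem dropNL_cons (c : Char) (v : List Char) (hv : v ≠ []) :
    dropNL (c :: v) = c :: dropNL v := by
  unfold dropNL
  rw [endswith_nl_cons c v hv]
  by_cases hE : PySem.Chars.endswith v ['\n'] = true
  · rw [if_pos hE, if_pos hE, List.dropLast_cons_of_ne_nil hv]
  · rw [if_neg hE, if_neg hE]

theorem dropNL_single (c : Char) (hc : c ≠ '\n') : dropNL [c] = [c] := by
  unfold dropNL
  rw [if_neg]
  intro hE
  simp [PySem.Chars.endswith, List.isSuffixOf, List.isPrefixOf] at hE
  exact hc hE.symm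

theorem replace_go_crlf : ∀ (fuel : Nat) (l acc : List Char), l.length ≤ fuel →
    PySem.Chars.replace.go ['\r', '\n'] ['\n'] fuel l acc = acc.reverse ++ repCRLF l := by
  intro fuel
  induction fuel with
  | zero =>
    intro l acc hf
    have hl : l = [] := List.eq_nil_of_length_eq_zero (by omega)
    subst hl
    rw [PySem.Chars.replace.go]
    simp [repCRLF]
  | succ fuel ih =>
    intro l acc hf
    cases l with
    | nil =>
      rw [PySem.Chars.replace.go]
      · simp [show repCRLF [] = [] from rfl]
      · omega
    | cons c t =>
      by_cases hc : c = '\r'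
      · subst hc
        cases t with
        | nil =>
          rw [PySem.Chars.replace.go, if_neg (by decide)]
          rw [ih [] _ (by simp)]
          rw [repCRLF_cr_nil]
          simp [show repCRLF [] = [] from rfl]
        | cons d t' =>
          by_cases hd : d = '\n'
          · subst hd
            rw [PySem.Chars.replace.go, if_pos (by simp [List.isPrefixOf])]
            have hdrop : List.drop (['\r', '\n'] : List Char).length ('\r' :: '\n' :: t') = t' := by
              simp
            rw [hdrop, ih t' _ (by simp at hf; omega)]
            rw [repCRLF_crlf]
            simp
          · rw [PySem.Chars.replace.go, if_neg (by simp [List.isPrefixOf]; intro h; exact absurd h.symm hd)]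
            rw [ih (d :: t') _ (by simp at hf ⊢; omega)]
            rw [repCRLF_cr_cons d t' hd]
            simp
      · rw [PySem.Chars.replace.go, if_neg (by simp [List.isPrefixOf]; intro h; exact absurd h.symm hc)]
        rw [ih t _ (by simp at hf; omega)]
        rw [repCRLF_cons_ne c t hc]
        simp

theorem replace_crlf (s : List Char) :
    PySem.Chars.replace s ['\r', '\n'] ['\n'] = repCRLF s := by
  unfold PySem.Chars.replace
  rw [if_neg (by decide)]
  rw [replace_go_crlf s.length s [] (le_refl _)]
  simp

theorem replace_go_cr : ∀ (fuel : Nat) (l acc : List Char), l.length ≤ fuel →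
    PySem.Chars.replace.go ['\r'] ['\n'] fuel l acc = acc.reverse ++ repCR l := by
  intro fuel
  induction fuel with
  | zero =>
    intro l acc hf
    have hl : l = [] := List.eq_nil_of_length_eq_zero (by omega)
    subst hl
    rw [PySem.Chars.replace.go]
    simp [repCR]
  | succ fuel ih =>
    intro l acc hf
    cases l with
    | nil =>
      rw [PySem.Chars.replace.go]
      · simp [show repCR [] = [] from rfl]
      · omega
    | cons c t =>
      by_cases hc : c = '\r'
      · subst hc
        rw [PySem.Chars.replace.go, if_pos (by simp [List.isPrefixOf])]
        have hdrop : List.drop (['\r'] : List Char).length ('\r' :: t) = t := by simp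
        rw [hdrop, ih t _ (by simp at hf; omega)]
        rw [repCR_cons, if_pos rfl]
        simp
      · rw [PySem.Chars.replace.go, if_neg (by simp [List.isPrefixOf]; intro h; exact absurd h.symm hc)]
        rw [ih t _ (by simp at hf; omega)]
        rw [repCR_cons, if_neg hc]
        simp

theorem replace_cr (s : List Char) :
    PySem.Chars.replace s ['\r'] ['\n'] = repCR s := by
  unfold PySem.Chars.replace
  rw [if_neg (by decide)]
  rw [replace_go_cr s.length s [] (le_refl _)]
  simp

theorem preCons_snoc (p : List Char) (c : Char) (M : List (List Char)) :
    preCons (p ++ [c]) M = preCons p (consHead c M) := by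
  cases M <;> by_cases hp : p = [] <;> simp [preCons, consHead, hp]

theorem splitlines_go_spec (isB : Char → Bool) (s : List Char)
    (hB : ∀ c ∈ s, isB c = (decide (c = '\n') || decide (c = '\r'))) :
    ∀ (cur : List Char) (acc : List (List Char)),
    PySem.Chars.splitlines.go isB s cur acc = acc.reverse ++ preCons cur.reverse (myLines s) := by
  induction s using myLines.induct with
  | case1 =>
    intro cur acc
    rw [PySem.Chars.splitlines.go]
    by_cases hcur : cur = []
    · subst hcur
      simp [preCons, myLines]
    · rw [if_neg (by simp [hcur])]
      simp [preCons, myLines, hcur]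
  | case2 t ih =>
    intro cur acc
    rw [PySem.Chars.splitlines.go]
    rw [ih (fun c hc => hB c (by simp [hc])) [] (cur.reverse :: acc)]
    rw [myLines_crlf]
    by_cases hcur : cur = []
    · subst hcur; simp [preCons]
    · simp [preCons, hcur]
  | case3 c t hx hb ih =>
    intro cur acc
    have hisB : isB c = true := by
      rw [hB c (by simp)]
      rcases hb with rfl | rfl <;> simp
    rcases hb with rfl | rfl
    · rw [PySem.Chars.splitlines.go, if_pos hisB]
      · rw [ih (fun c hc => hB c (by simp [hc])) [] (cur.reverse :: acc)]
        rw [myLines_cons_ne '\n' t (by decide), if_pos (by simp)]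
        by_cases hcur : cur = []
        · subst hcur; simp [preCons]
        · simp [preCons, hcur]
      · intro rest h1 h2
        exact absurd h1 (by decide)
    · cases t with
      | nil =>
        rw [PySem.Chars.splitlines.go, if_pos hisB, PySem.Chars.splitlines.go]
        · rw [myLines_cr_nil]
          by_cases hcur : cur = [] <;> simp [preCons, hcur]
        · intro rest h1 h2
          exact absurd h2 (by simp)
      | cons d t' =>
        have hd : d ≠ '\n' := fun h => hx t' rfl (by rw [h])
        rw [PySem.Chars.splitlines.go.eq_def]
        split
        all_goals try (solve | simp_all)
        all_goals
          rename_i cur2 acc2 z1 z2 z3 cN restN hexcl heq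
          injection heq with hc ht
          subst hc
          subst ht
          rw [if_pos hisB]
          rw [ih (fun c hc => hB c (by simp [hc])) [] (cur2.reverse :: acc2)]
          rw [myLines_cr_cons d t' hd]
          by_cases hcur : cur2 = []
          · subst hcur; simp [preCons]
          · simp [preCons, hcur]
  | case4 c t hx hb ih =>
    intro cur acc
    have hcn : c ≠ '\n' := fun h => hb (Or.inl h)
    have hcr : c ≠ '\r' := fun h => hb (Or.inr h)
    have hisB : isB c = false := by
      rw [hB c (by simp)]
      simp [hcn, hcr]
    rw [PySem.Chars.splitlines.go.eq_def]
    split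
    all_goals try (solve | simp_all)
    all_goals
      rename_i cur2 acc2 z1 z2 z3 cN restN hexcl heq
      injection heq with hc ht
      subst hc
      subst ht
      rw [if_neg (by rw [hisB]; simp)]
      rw [ih (fun c hc => hB c (by simp [hc])) (c :: cur2) acc2]
      rw [myLines_cons_ne c t hcr, if_neg hb]
      rw [List.reverse_cons, preCons_snoc]

theorem splitlines_eq_myLines (s : List Char) (h : ∀ c ∈ s, pvDomChar c = true) :
    PySem.Chars.splitlines s = myLines s := by
  simp only [PySem.Chars.splitlines]
  refine ((splitlines_go_spec _ s ?_ [] []).trans (by simp [preCons]))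
  intro c hc
  have hd := h c hc
  unfold pvDomChar at hd
  simp only [Bool.or_eq_true, Bool.and_eq_true, decide_eq_true_eq, beq_iff_eq] at hd
  rw [Bool.eq_iff_iff]
  simp only [Bool.or_eq_true, decide_eq_true_eq]
  rw [char_eq_iff_toNat c '\n', char_eq_iff_toNat c '\r',
      show ('\n').toNat = 10 from rfl, show ('\r').toNat = 13 from rfl]
  omega

theorem nl_step (t : List Char) (ih : dropNL (repCR (repCRLF t)) = mJoin (myLines t)) :
    dropNL ('\n' :: repCR (repCRLF t)) = mJoin ([] :: myLines t) := by
  by_cases ht : t = []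
  · subst ht; rfl
  · have hv := repCR_ne_nil _ (repCRLF_ne_nil _ ht)
    rw [dropNL_cons '\n' _ hv, ih]
    cases hM : myLines t with
    | nil => exact absurd hM (myLines_ne_nil t ht)
    | cons y ys =>
      rw [show mJoin ([] :: y :: ys) = joinT (y :: ys) from by simp [mJoin], joinT_cons]

theorem norm_join (s : List Char) :
    dropNL (repCR (repCRLF s)) = mJoin (myLines s) := by
  induction s using myLines.induct with
  | case1 => rfl
  | case2 t ih =>
    rw [repCRLF_crlf, repCR_cons, if_neg (by decide), myLines_crlf]
    exact nl_step t ih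
  | case3 c t hx hb ih =>
    rcases hb with rfl | rfl
    · rw [repCRLF_cons_ne '\n' t (by decide), repCR_cons, if_neg (by decide),
          myLines_cons_ne '\n' t (by decide), if_pos (by simp)]
      exact nl_step t ih
    · cases t with
      | nil => rfl
      | cons d t' =>
        have hd : d ≠ '\n' := fun h => hx t' rfl (by rw [h])
        rw [repCRLF_cr_cons d t' hd, repCR_cons, if_pos rfl, myLines_cr_cons d t' hd]
        exact nl_step (d :: t') ih
  | case4 c t hx hb ih =>
    have hcn : c ≠ '\n' := fun h => hb (Or.inl h)
    have hcr : c ≠ '\r' := fun h => hb (Or.inr h)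
    rw [repCRLF_cons_ne c t hcr, repCR_cons, if_neg hcr, myLines_cons_ne c t hcr, if_neg hb]
    by_cases ht : t = []
    · subst ht
      rw [show repCR (repCRLF ([] : List Char)) = [] from rfl, dropNL_single c hcn]
      simp [show myLines [] = [] from rfl, consHead, mJoin, joinT]
    · have hv := repCR_ne_nil _ (repCRLF_ne_nil _ ht)
      rw [dropNL_cons c _ hv, ih, mJoin_consHead]

theorem myLines_nl_free (s : List Char) : ∀ l ∈ myLines s, '\n' ∉ l := by
  induction s using myLines.induct with
  | case1 => simp [myLines]
  | case2 t ih =>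
    intro l hl
    rw [myLines_crlf] at hl
    rcases List.mem_cons.mp hl with rfl | h
    · simp
    · exact ih l h
  | case3 c t hx hb ih =>
    intro l hl
    rcases hb with rfl | rfl
    · rw [myLines_cons_ne '\n' t (by decide), if_pos (by simp)] at hl
      rcases List.mem_cons.mp hl with rfl | h
      · simp
      · exact ih l h
    · cases t with
      | nil =>
        rw [myLines_cr_nil] at hl
        simp at hl
        subst hl
        simp
      | cons d t' =>
        have hd : d ≠ '\n' := fun h => hx t' rfl (by rw [h])
        rw [myLines_cr_cons d t' hd] at hl
        rcases List.mem_cons.mp hl with rfl | h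
        · simp
        · exact ih l h
  | case4 c t hx hb ih =>
    intro l hl
    have hcn : c ≠ '\n' := fun h => hb (Or.inl h)
    have hcr : c ≠ '\r' := fun h => hb (Or.inr h)
    rw [myLines_cons_ne c t hcr, if_neg hb] at hl
    cases hM : myLines t with
    | nil =>
      rw [hM] at hl
      simp [consHead] at hl
      subst hl
      intro hmem
      simp at hmem
      exact hcn hmem.symm
    | cons y ys =>
      rw [hM] at hl
      simp [consHead] at hl
      rcases hl with rfl | h
      · intro hmem
        rcases List.mem_cons.mp hmem with h1 | h1
        · exact hcn h1.symm
        · exact ih y (by rw [hM]; simp) h1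
      · exact ih l (by rw [hM]; simp [h]) 

-- ---------- A-side loop characterization ----------

theorem aLoop_true (ls res : List String) : rfclLoopA ls true res = res ++ ls := by
  induction ls generalizing res with
  | nil => simp [rfclLoopA]
  | cons l ls ih => rw [rfclLoopA, if_neg (by simp), ih]; simp

theorem aLoop_nomatch (ls res : List String)
    (h : ∀ l ∈ ls, PySem.Str.isIn "class" l = false) :
    rfclLoopA ls false res = res ++ ls := by
  induction ls generalizing res with
  | nil => simp [rfclLoopA]
  | cons l ls ih =>
    rw [rfclLoopA, if_neg (by rw [h l (by simp)]; decide),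
        ih _ (fun x hx => h x (by simp [hx]))]
    simp

theorem aLoop_split (P : List String) (m : String) (Q : List String) (res : List String)
    (hP : ∀ l ∈ P, PySem.Str.isIn "class" l = false)
    (hm : PySem.Str.isIn "class" m = true) :
    rfclLoopA (P ++ m :: Q) false res = res ++ P ++ Q := by
  induction P generalizing res with
  | nil =>
    rw [List.nil_append, rfclLoopA, if_pos (by rw [hm]; decide), aLoop_true]
    simp
  | cons a P ih =>
    rw [List.cons_append, rfclLoopA, if_neg (by rw [hP a (by simp)]; decide),
        ih _ (fun x hx => hP x (by simp [hx]))]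
    simp

theorem exists_split (L : List String) (h : ¬ ∀ l ∈ L, PySem.Str.isIn "class" l = false) :
    ∃ P m Q, L = P ++ m :: Q ∧ (∀ l ∈ P, PySem.Str.isIn "class" l = false) ∧
      PySem.Str.isIn "class" m = true := by
  induction L with
  | nil => exact absurd (by simp) h
  | cons a L ih =>
    by_cases ha : PySem.Str.isIn "class" a = true
    · exact ⟨[], a, L, by simp, by simp, ha⟩
    · have ha' : PySem.Str.isIn "class" a = false := by simpa using ha
      obtain ⟨P, m, Q, hL, hP, hm⟩ := ih (by
        intro hall
        exact h (by
          intro l hl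
          rcases List.mem_cons.mp hl with rfl | hl'
          · exact ha'
          · exact hall l hl'))
      exact ⟨a :: P, m, Q, by rw [hL, List.cons_append], by
        intro l hl
        rcases List.mem_cons.mp hl with rfl | hl'
        · exact ha'
        · exact hP l hl', hm⟩

-- ---------- bridging to the ports ----------

theorem chars_join_eq_mJoin (ls : List (List Char)) :
    PySem.Chars.join ['\n'] ls = mJoin ls := by
  induction ls with
  | nil => rfl
  | cons x xs ih =>
    cases xs with
    | nil => simp [PySem.Chars.join, List.intercalate, mJoin, joinT]
    | cons y ys =>
      have h1 : PySem.Chars.join ['\n'] (x :: y :: ys)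
          = x ++ '\n' :: PySem.Chars.join ['\n'] (y :: ys) := by
        simp only [PySem.Chars.join]
        simp [List.intercalate, List.intersperse]
      rw [h1, ih, mJoin_cons₂ x (y :: ys) (by simp)]

theorem cut_toList (T : String) :
    (let j := PySem.Str.find T "class"
     if j = -1 then T
     else
       let start := PySem.Str.rfindFrom T "\n" 0 (some j) + 1
       let e := PySem.Str.findFrom T "\n" j
       if e = -1 then (if start > 0 then PySem.Str.slice T none (some (start - 1)) else "")
       else PySem.Str.slice T none (some start) ++ PySem.Str.slice T (some (e + 1)) none).toList
    = bSplice T.toList := by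
  unfold bSplice bCut
  show (if PySem.Str.find T "class" = -1 then T
     else
       if PySem.Str.findFrom T "\n" (PySem.Str.find T "class") = -1 then
         (if PySem.Str.rfindFrom T "\n" 0 (some (PySem.Str.find T "class")) + 1 > 0 then
            PySem.Str.slice T none (some (PySem.Str.rfindFrom T "\n" 0 (some (PySem.Str.find T "class")) + 1 - 1))
          else "")
       else PySem.Str.slice T none (some (PySem.Str.rfindFrom T "\n" 0 (some (PySem.Str.find T "class")) + 1)) ++
            PySem.Str.slice T (some (PySem.Str.findFrom T "\n" (PySem.Str.find T "class") + 1)) none).toList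
    = _
  rw [PySem.Str.find_eq, show ("class").toList = CLSL from rfl]
  by_cases hj : PySem.Chars.find T.toList CLSL = -1
  · rw [if_pos hj, if_pos hj]
  · rw [if_neg hj, if_neg hj, PySem.Str.findFrom_eq, PySem.Str.rfindFrom_eq,
        show ("\n").toList = ['\n'] from rfl]
    by_cases he : PySem.Chars.findFrom T.toList ['\n'] (PySem.Chars.find T.toList CLSL) = -1
    · rw [if_pos he, if_pos he]
      by_cases hst : PySem.Chars.rfindFrom T.toList ['\n'] 0 (some (PySem.Chars.find T.toList CLSL)) + 1 > 0
      · rw [if_pos hst, if_pos hst, PySem.Str.toList_slice]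
      · rw [if_neg hst, if_neg hst]
        rfl
    · rw [if_neg he, if_neg he, String.toList_append, PySem.Str.toList_slice, PySem.Str.toList_slice]

theorem alt_toList (code : String) :
    (remove_first_class_line_alt code).toList = bSplice (dropNL (repCR (repCRLF code.toList))) := by
  have key : ∀ (T : String) (t : List Char), T.toList = t →
      (let j := PySem.Str.find T "class"
       if j = -1 then T
       else
         let start := PySem.Str.rfindFrom T "\n" 0 (some j) + 1
         let e := PySem.Str.findFrom T "\n" j
         if e = -1 then (if start > 0 then PySem.Str.slice T none (some (start - 1)) else "")
         else PySem.Str.slice T none (some start) ++ PySem.Str.slice T (some (e + 1)) none).toList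
      = bSplice t := fun T t h => (cut_toList T).trans (by rw [h])
  unfold remove_first_class_line_alt
  refine key _ _ ?_
  have h0 : (PySem.Str.replace (PySem.Str.replace code "\r\n" "\n") "\r" "\n").toList
      = repCR (repCRLF code.toList) := by
    rw [PySem.Str.toList_replace, PySem.Str.toList_replace,
        show ("\r\n").toList = ['\r', '\n'] from rfl, show ("\n").toList = ['\n'] from rfl,
        show ("\r").toList = ['\r'] from rfl, replace_crlf, replace_cr]
  unfold dropNL
  rw [PySem.Str.endswith_eq, h0, show ("\n").toList = ['\n'] from rfl]
  by_cases hE : PySem.Chars.endswith (repCR (repCRLF code.toList)) ['\n'] = true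
  · rw [if_pos hE, if_pos hE, PySem.Str.slice_to_neg_one, h0]
  · rw [if_neg hE, if_neg hE, h0]

-- ===== VERDICT (by name: the statement is the Claim_ definition above) =====
theorem remove_first_class_line_spec : Claim_equal_remove_first_class_line := by
  intro code hDom
  unfold Spec_remove_first_class_line
  rw [← String.toList_inj]
  have hDom' : ∀ c ∈ code.toList, pvDomChar c = true := by
    unfold Dom_remove_first_class_line pvDomStr at hDom
    exact List.all_eq_true.mp hDom
  have hB : (remove_first_class_line_alt code).toList
      = bSplice (mJoin (PySem.Chars.splitlines code.toList)) := by
    rw [alt_toList, norm_join code.toList, splitlines_eq_myLines code.toList hDom']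
  have hmap : List.map String.toList (PySem.Str.splitlines code)
      = PySem.Chars.splitlines code.toList := PySem.Str.splitlines_map_toList code
  have hfree : ∀ l ∈ PySem.Chars.splitlines code.toList, '\n' ∉ l := by
    rw [splitlines_eq_myLines _ hDom']
    exact myLines_nl_free _
  unfold remove_first_class_line
  by_cases hex : ∀ l ∈ PySem.Str.splitlines code, PySem.Str.isIn "class" l = false
  · rw [aLoop_nomatch _ _ hex, List.nil_append, PySem.Str.toList_join,
        show ("\n").toList = ['\n'] from rfl, chars_join_eq_mJoin, hmap, hB]
    have hno : ∀ l ∈ PySem.Chars.splitlines code.toList, ¬ CLSL <:+: l := by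
      intro l hl
      rw [← hmap] at hl
      obtain ⟨sl, hsl, rfl⟩ := List.mem_map.mp hl
      have h1 := hex sl hsl
      rw [PySem.Str.isIn_eq, show ("class").toList = CLSL from rfl] at h1
      intro hinf
      exact absurd ((PySem.Chars.isIn_iff_infix _ _).mpr hinf) (by simp [h1])
    rw [bSplice_nomatch _ hno]
  · obtain ⟨SP, sm, SQ, hsplit, hSP, hsm⟩ := exists_split _ hex
    rw [hsplit, aLoop_split SP sm SQ [] hSP hsm, List.nil_append, PySem.Str.toList_join,
        show ("\n").toList = ['\n'] from rfl, chars_join_eq_mJoin, hB]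
    have hmap2 : PySem.Chars.splitlines code.toList
        = List.map String.toList SP ++ sm.toList :: List.map String.toList SQ := by
      rw [← hmap, hsplit]
      simp
    rw [hmap2, bSplice_match]
    · rw [List.map_append]
    · intro l hl
      obtain ⟨sl, hsl, rfl⟩ := List.mem_map.mp hl
      have h1 := hSP sl hsl
      rw [PySem.Str.isIn_eq, show ("class").toList = CLSL from rfl] at h1
      intro hinf
      exact absurd ((PySem.Chars.isIn_iff_infix _ _).mpr hinf) (by simp [h1])
    · rw [PySem.Str.isIn_eq, show ("class").toList = CLSL from rfl] at hsm
      exact (PySem.Chars.isIn_iff_infix _ _).mp hsm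
    · exact hfree sm.toList (by rw [hmap2]; simp)
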